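-- pv_equiv track=rewrite | github.com/apms75/email_writer | writer/main.py | extract_k_first_results
-- ===== SOURCE A (Python) =====
-- from typing import Callable, List, Optional
--
-- def extract_k_first_results(k: int, s: str) -> Optional[List[str]]:
--     res = []
--     for line in s.split("\n"):
--         for word in line.split():
--             if not word[0].isalpha():
--                 continue
--             res.append(word)
--             k -= 1
--             if k == 0:
--                 return res
--     return None
-- ===== SOURCE B (Python) =====
-- def extract_k_first_results(k, s):
--     alpha = [w for w in s.split() if w[0].isalpha()]
--     return alpha[:k] if 0 < k <= len(alpha) else None
-- ===== Notes on version B (the rewrite author's own statement) =====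
-- stated objective: simpler
-- what changed: Replaces A's early-exit nested loops (over lines of s.split('\n'), then words of line.split(), with a mutable countdown and mid-loop return) by a single whitespace split filtered once into the list of letter-initial words, returned as a guarded slice alpha[:k].
import Mathlib
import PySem

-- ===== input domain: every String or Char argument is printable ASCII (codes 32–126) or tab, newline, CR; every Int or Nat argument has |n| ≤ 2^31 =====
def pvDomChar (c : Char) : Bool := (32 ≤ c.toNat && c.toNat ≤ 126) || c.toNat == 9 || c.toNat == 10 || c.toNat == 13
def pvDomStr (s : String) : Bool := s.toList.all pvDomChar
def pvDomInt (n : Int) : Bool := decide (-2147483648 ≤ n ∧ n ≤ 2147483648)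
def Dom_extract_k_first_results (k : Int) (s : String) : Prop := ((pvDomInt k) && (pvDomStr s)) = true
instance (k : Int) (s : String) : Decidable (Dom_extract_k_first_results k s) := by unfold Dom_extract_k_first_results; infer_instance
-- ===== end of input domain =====

-- B replaces A's early-exit nested streaming loop (lines, then words, with a countdown) by
-- filter-then-slice over a single whitespace split; objective: simpler. Both are total.

-- ===== PORT A =====
-- word[0].isalpha(); words produced by split are never empty, so the none branch
-- (where Python would raise IndexError) is unreachable.
def pvFirstAlpha (w : String) : Bool :=
  match PySem.Str.pyGet? w 0 with
  | some c => PySem.Chars.isalpha c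
  | none => false

-- inner 'for word in line.split()' loop; .inr = early 'return res', .inl = fall through with state
def pvInner : List String → Int → List String → ((Int × List String) ⊕ (List String))
  | [], k, res => .inl (k, res)
  | w :: ws, k, res =>
    if pvFirstAlpha w = false then pvInner ws k res
    else
      if k - 1 = 0 then .inr (res ++ [w]) else pvInner ws (k - 1) (res ++ [w])

-- outer 'for line in s.split("\n")' loop; falls off the end → return None
def pvOuter : List String → Int → List String → Option (List String)
  | [], _, _ => none
  | l :: ls, k, res =>
    match pvInner (PySem.Str.split₀ l) k res with
    | .inr r => some r
    | .inl (k', res') => pvOuter ls k' res'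

def extract_k_first_results (k : Int) (s : String) : Option (List String) :=
  match PySem.Str.split? s "\n" with
  | some lines => pvOuter lines k []
  | none => none   -- unreachable: the separator "\n" is nonempty

-- ===== PORT B =====
def extract_k_first_results_alt (k : Int) (s : String) : Option (List String) :=
  let alpha := (PySem.Str.split₀ s).filter pvFirstAlpha
  if 0 < k ∧ k ≤ (alpha.length : Int) then PySem.List.slice alpha none (some k) else none

-- ===== PRECONDITION & SPEC =====
def Spec_extract_k_first_results (k : Int) (s : String) (out : Option (List String)) : Prop := out = extract_k_first_results_alt k s
instance (k : Int) (s : String) (out : Option (List String)) : Decidable (Spec_extract_k_first_results k s out) := by unfold Spec_extract_k_first_results; infer_instance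

-- ===== CLAIM (what is proved, stated in full; the proofs are below) =====
def Claim_equal_extract_k_first_results : Prop := ∀ (k : Int) (s : String), Dom_extract_k_first_results k s → Spec_extract_k_first_results k s (extract_k_first_results k s)

-- ===== LEMMAS AND PROOFS =====

-- The fused single-list streaming loop (A's two loops glued together).
def pvStream : List String → Int → List String → Option (List String)
  | [], _, _ => none
  | w :: ws, k, res =>
    if pvFirstAlpha w = false then pvStream ws k res
    else
      if k - 1 = 0 then some (res ++ [w]) else pvStream ws (k - 1) (res ++ [w])

-- structural splitter at '\n' (cur = reversed chars of the current piece)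
def pvSplitNl : List Char → List Char → List (List Char)
  | [], cur => [cur.reverse]
  | c :: rest, cur => if c = '\n' then cur.reverse :: pvSplitNl rest [] else pvSplitNl rest (c :: cur)

theorem pvInner_stream (ws : List String) : ∀ (rest : List String) (k : Int) (res : List String),
    (match pvInner ws k res with
      | .inr r => some r
      | .inl (k', res') => pvStream rest k' res') = pvStream (ws ++ rest) k res := by
  induction ws with
  | nil => intro rest k res; simp [pvInner]
  | cons w ws ih =>
    intro rest k res
    simp only [pvInner, List.cons_append, pvStream]
    by_cases h : pvFirstAlpha w = false
    · simp [h, ih]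
    · simp only [h]
      by_cases hk : k - 1 = 0
      · simp [hk]
      · simp [hk, ih]

theorem pvOuter_stream (lines : List String) : ∀ (k : Int) (res : List String),
    pvOuter lines k res = pvStream (lines.flatMap PySem.Str.split₀) k res := by
  induction lines with
  | nil => intro k res; simp [pvOuter, pvStream]
  | cons l ls ih =>
    intro k res
    simp only [pvOuter, List.flatMap_cons]
    rw [← pvInner_stream]
    cases pvInner (PySem.Str.split₀ l) k res with
    | inr r => simp
    | inl p => simp [ih]

theorem pvStream_filter (ws : List String) : ∀ (k : Int) (res : List String),
    pvStream ws k res =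
      if 0 < k ∧ k ≤ ((ws.filter pvFirstAlpha).length : Int)
      then some (res ++ (ws.filter pvFirstAlpha).take k.toNat) else none := by
  induction ws with
  | nil =>
    intro k res
    simp only [pvStream, List.filter_nil, List.length_nil]
    split_ifs with h
    · omega
    · rfl
  | cons w ws ih =>
    intro k res
    simp only [pvStream, List.filter_cons]
    cases hb : pvFirstAlpha w with
    | false => simp [ih]
    | true =>
      rw [if_neg (by simp), if_pos rfl]
      simp only [List.length_cons]
      by_cases hk : k - 1 = 0
      · have hk1 : k = 1 := by omega
        subst hk1
        rw [if_pos hk]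
        rw [if_pos ⟨by norm_num, by push_cast; omega⟩]
        simp
      · rw [if_neg hk, ih]
        by_cases hc : 0 < k - 1 ∧ k - 1 ≤ ((ws.filter pvFirstAlpha).length : Int)
        · rw [if_pos hc, if_pos (by push_cast at hc ⊢; omega)]
          have htn : k.toNat = (k - 1).toNat + 1 := by omega
          rw [htn, List.take_succ_cons]
          simp [List.append_assoc]
        · rw [if_neg hc, if_neg (by push_cast at hc ⊢; omega)]

-- split₀.go: the accumulator is a reversed prefix of the output
theorem pvGo_acc (s : List Char) : ∀ (cur : List Char) (acc : List (List Char)),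
    PySem.Chars.split₀.go s cur acc = acc.reverse ++ PySem.Chars.split₀.go s cur [] := by
  induction s with
  | nil =>
    intro cur acc
    rw [PySem.Chars.split₀.go.eq_def, PySem.Chars.split₀.go.eq_def]
    by_cases h : cur.isEmpty <;> simp [h]
  | cons c rest ih =>
    intro cur acc
    rw [PySem.Chars.split₀.go.eq_def]
    conv_rhs => rw [PySem.Chars.split₀.go.eq_def]
    cases hs : PySem.Chars.isspace c with
    | false =>
      simp only [hs, Bool.false_eq_true, if_false]
      exact ih (c :: cur) acc
    | true =>
      simp only [hs, if_true]
      by_cases h : cur.isEmpty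
      · simp only [h, if_true]
        exact ih [] acc
      · simp only [h, if_false, Bool.false_eq_true]
        rw [ih [] (cur.reverse :: acc), ih [] [cur.reverse]]
        simp

-- split₀ distributes over an inner newline (newline is whitespace, so it just flushes)
theorem pvSplit₀_newline (l : List Char) : ∀ (r : List Char),
    PySem.Chars.split₀ (l ++ '\n' :: r) = PySem.Chars.split₀ l ++ PySem.Chars.split₀ r := by
  have key : ∀ (l : List Char) (r cur : List Char) (acc : List (List Char)),
      PySem.Chars.split₀.go (l ++ '\n' :: r) cur acc =
        PySem.Chars.split₀.go l cur acc ++ PySem.Chars.split₀.go r [] [] := by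
    intro l
    induction l with
    | nil =>
      intro r cur acc
      simp only [List.nil_append]
      rw [PySem.Chars.split₀.go.eq_def]
      conv_rhs => rw [PySem.Chars.split₀.go.eq_def]
      have hnl : PySem.Chars.isspace '\n' = true := by decide
      by_cases h : cur.isEmpty
      · simp only [hnl, h, if_true]
        rw [pvGo_acc]
      · simp only [hnl, h, if_true, if_false, Bool.false_eq_true]
        rw [pvGo_acc r [] (cur.reverse :: acc)]
    | cons c rest ih =>
      intro r cur acc
      simp only [List.cons_append]
      rw [PySem.Chars.split₀.go.eq_def]
      conv_rhs => rw [PySem.Chars.split₀.go.eq_def]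
      cases hs : PySem.Chars.isspace c with
      | false =>
        simp only [hs, Bool.false_eq_true, if_false]
        exact ih r (c :: cur) acc
      | true =>
        simp only [hs, if_true]
        by_cases h : cur.isEmpty
        · simp only [h, if_true]; exact ih r [] acc
        · simp only [h, if_false, Bool.false_eq_true]; exact ih r [] (cur.reverse :: acc)
  intro r
  simp only [PySem.Chars.split₀]
  exact key l r [] []

-- splitOn.go with sep "\n" and enough fuel is pvSplitNl (with the accumulator extracted)
theorem pvSplitOnGo (fuel : Nat) : ∀ (cs cur : List Char) (acc : List (List Char)),
    cs.length < fuel →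
    PySem.Chars.splitOn.go ['\n'] fuel cs cur acc = acc.reverse ++ pvSplitNl cs cur := by
  induction fuel with
  | zero => intro cs cur acc h; omega
  | succ fuel ih =>
    intro cs cur acc h
    rw [PySem.Chars.splitOn.go.eq_def]
    cases cs with
    | nil => simp [pvSplitNl]
    | cons c rest =>
      by_cases hc : c = '\n'
      · subst hc
        have hp : List.isPrefixOf ['\n'] ('\n' :: rest) = true := by
          simp [List.isPrefixOf]
        simp only [hp, if_true, List.length_cons, List.length_nil,
          List.drop_succ_cons, List.drop_zero]
        rw [ih rest [] _ (by simpa using Nat.lt_of_succ_lt_succ h)]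
        simp [pvSplitNl]
      · have hp : List.isPrefixOf ['\n'] (c :: rest) = false := by
          simp [List.isPrefixOf]
          intro hh
          exact hc hh.symm
        simp only [hp, Bool.false_eq_true, if_false]
        rw [ih rest (c :: cur) acc (by simpa using Nat.lt_of_succ_lt_succ h)]
        simp only [pvSplitNl, hc, if_false]

theorem pvSplitNl_flat (cs : List Char) : ∀ (cur : List Char),
    (pvSplitNl cs cur).flatMap PySem.Chars.split₀ = PySem.Chars.split₀ (cur.reverse ++ cs) := by
  induction cs with
  | nil => intro cur; simp [pvSplitNl]
  | cons c rest ih =>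
    intro cur
    by_cases hc : c = '\n'
    · subst hc
      simp only [pvSplitNl, if_true, List.flatMap_cons]
      rw [ih []]
      simp only [List.reverse_nil, List.nil_append]
      exact (pvSplit₀_newline cur.reverse rest).symm
    · simp only [pvSplitNl, hc, if_false]
      rw [ih (c :: cur)]
      simp

-- the nested split equals the single whitespace split
theorem pvFlatten (cs : List Char) :
    (PySem.Chars.splitOn cs ['\n']).flatMap PySem.Chars.split₀ = PySem.Chars.split₀ cs := by
  rw [PySem.Chars.splitOn, pvSplitOnGo (cs.length + 1) cs [] [] (by omega)]
  simpa using pvSplitNl_flat cs []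

theorem pvFlatten_str (s : String) :
    (((PySem.Chars.splitOn s.toList ['\n']).map String.ofList).flatMap PySem.Str.split₀)
      = PySem.Str.split₀ s := by
  rw [List.flatMap_map]
  have h1 : ∀ l : List Char, PySem.Str.split₀ (String.ofList l)
      = (PySem.Chars.split₀ l).map String.ofList := by
    intro l; rw [PySem.Str.split₀.eq_1]; simp
  calc ((PySem.Chars.splitOn s.toList ['\n']).flatMap fun l => PySem.Str.split₀ (String.ofList l))
      = ((PySem.Chars.splitOn s.toList ['\n']).flatMap fun l => (PySem.Chars.split₀ l).map String.ofList) := by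
        simp only [h1]
    _ = ((PySem.Chars.splitOn s.toList ['\n']).flatMap PySem.Chars.split₀).map String.ofList := by
        rw [List.map_flatMap]
    _ = PySem.Str.split₀ s := by rw [pvFlatten, PySem.Str.split₀.eq_1]

-- ===== VERDICT (by name: the statement is the Claim_ definition above) =====
theorem extract_k_first_results_spec : Claim_equal_extract_k_first_results := by
  intro k s _
  unfold Spec_extract_k_first_results extract_k_first_results extract_k_first_results_alt
  rw [PySem.Str.split?.eq_1, PySem.Chars.split?.eq_1]
  have hnl : ("\n" : String).toList = ['\n'] := by decide
  simp only [hnl]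
  rw [if_neg (by decide)]
  simp only [Option.map_some]
  rw [pvOuter_stream, pvFlatten_str, pvStream_filter]
  by_cases hc : 0 < k ∧ k ≤ (((PySem.Str.split₀ s).filter pvFirstAlpha).length : Int)
  · rw [if_pos hc, if_pos hc, PySem.List.slice_to _ (le_of_lt hc.1)]
    simp
  · rw [if_neg hc, if_neg hc]
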